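-- pv_equiv track=rewrite | github.com/timedomain-tech/open-creator | creator/utils/code_split.py | split_code_blocks
-- ===== SOURCE A (Python) =====
-- def split_code_blocks(code: str):
--     lines = code.strip().split('\n')
--     i = len(lines) - 1
--
--     codes = []
--
--     while i >= 0:
--         line = lines[i]
--
--         # If line not start with space
--         if not line.startswith(("    ", "\t")):
--             codes.append(line)
--             i -= 1
--         # Else
--         else:
--             break
--
--     # Add remaining lines as a single block
--     if i >= 0:
--         codes.append("\n".join(lines[:i+1]))
--
--     return codes[::-1]
-- ===== SOURCE B (Python) =====
-- def split_code_blocks(code: str):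
--     lines = code.strip().split('\n')
--     # one forward pass: index of the last indented line (-1 if none)
--     split = -1
--     for i, line in enumerate(lines):
--         if line.startswith(("    ", "\t")):
--             split = i
--     if split >= 0:
--         return ["\n".join(lines[:split + 1])] + lines[split + 1:]
--     return lines[:]
-- ===== Notes on version B (the rewrite author's own statement) =====
-- stated objective: simpler
-- what changed: Replaces A's backward while-loop that accumulates trailing lines and reverses the result with one forward pass computing the index of the last indented line, then building the result by slicing.
import Mathlib
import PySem

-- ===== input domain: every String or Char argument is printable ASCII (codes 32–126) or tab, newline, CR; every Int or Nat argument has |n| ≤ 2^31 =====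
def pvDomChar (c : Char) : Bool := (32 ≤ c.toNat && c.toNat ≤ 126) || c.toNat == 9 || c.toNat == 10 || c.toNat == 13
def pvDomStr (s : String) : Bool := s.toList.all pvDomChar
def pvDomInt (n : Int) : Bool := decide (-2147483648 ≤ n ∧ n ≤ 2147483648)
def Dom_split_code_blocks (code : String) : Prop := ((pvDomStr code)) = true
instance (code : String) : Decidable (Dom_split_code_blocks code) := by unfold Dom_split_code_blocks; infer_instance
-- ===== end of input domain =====

-- B replaces A's backward accumulate-and-reverse loop by one forward pass for the
-- last indented index plus slicing (objective: simpler decomposition; same cost).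
-- ===== PORT A =====
-- shared helper: line.startswith(("    ", "\t"))
def pvIndented (l : String) : Bool := PySem.Str.startswith l "    " || PySem.Str.startswith l "\t"

-- A's backward while-loop: m = i + 1 (so 'i >= 0' is 'm >= 1'); returns (codes, final m).
-- pyGet? is exact; the .getD "" default is never taken since m - 1 < lines.length at every call.
def aLoop (lines : List String) : Nat → List String → (List String × Nat)
  | 0, codes => (codes, 0)
  | m + 1, codes =>
      let line := (PySem.List.pyGet? lines (m : Int)).getD ""
      if !pvIndented line then aLoop lines m (codes ++ [line])
      else (codes, m + 1)

def split_code_blocks (code : String) : List String :=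
  let lines := (PySem.Str.split? (PySem.Str.strip code) "\n").getD []   -- .split('\n'), sep nonempty
  let r := aLoop lines lines.length []
  let codes :=
    if 1 ≤ r.2 then
      r.1 ++ [PySem.Str.join "\n" (PySem.List.slice lines none (some (r.2 : Int)))]
    else r.1
  (PySem.List.slice? codes none none (-1)).getD []   -- codes[::-1]

-- ===== PORT B =====
def split_code_blocks_alt (code : String) : List String :=
  let lines := (PySem.Str.split? (PySem.Str.strip code) "\n").getD []
  let split := (PySem.List.enumerate lines).foldl
    (fun acc il => if pvIndented il.2 then il.1 else acc) (-1 : Int)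
  if 0 ≤ split then
    PySem.Str.join "\n" (PySem.List.slice lines none (some (split + 1)))
      :: PySem.List.slice lines (some (split + 1)) none
  else lines

-- ===== PRECONDITION & SPEC =====
def Spec_split_code_blocks (code : String) (out : List String) : Prop := out = split_code_blocks_alt code
instance (code : String) (out : List String) : Decidable (Spec_split_code_blocks code out) := by unfold Spec_split_code_blocks; infer_instance

-- ===== CLAIM (what is proved, stated in full; the proofs are below) =====
def Claim_equal_split_code_blocks : Prop := ∀ (code : String), Dom_split_code_blocks code → Spec_split_code_blocks code (split_code_blocks code)

-- ===== LEMMAS AND PROOFS =====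

theorem len_takeWhile_le {α : Type} (q : α → Bool) (l : List α) :
    (l.takeWhile q).length ≤ l.length :=
  (List.takeWhile_prefix q).length_le

theorem aLoop_acc (lines : List String) (m : Nat) (codes : List String) :
    aLoop lines m codes = (codes ++ (aLoop lines m []).1, (aLoop lines m []).2) := by
  induction m generalizing codes with
  | zero => simp [aLoop]
  | succ m ih =>
      simp only [aLoop]
      split
      · rw [ih, ih ([] ++ _)]; simp
      · simp

-- closed form of A's loop
theorem aLoop_closed (lines : List String) (m : Nat) (h : m ≤ lines.length) :
    aLoop lines m [] =
      (((lines.take m).reverse.takeWhile (fun l => !pvIndented l)),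
       m - ((lines.take m).reverse.takeWhile (fun l => !pvIndented l)).length) := by
  induction m with
  | zero => simp [aLoop]
  | succ m ih =>
      have hm : m < lines.length := by omega
      have hget : (PySem.List.pyGet? lines (m : Int)).getD "" = lines[m] := by
        simp [PySem.List.pyGet?_natCast, List.getElem?_eq_getElem hm]
      have htake : (lines.take (m + 1)).reverse = lines[m] :: (lines.take m).reverse := by
        rw [List.take_add_one, List.getElem?_eq_getElem hm]; simp
      rw [htake]
      simp only [aLoop, hget]
      by_cases hp : pvIndented lines[m]
      · simp [hp]
      · have hlen : ((lines.take m).reverse.takeWhile (fun l => !pvIndented l)).length ≤ m := by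
          have := len_takeWhile_le (fun l => !pvIndented l) (lines.take m).reverse
          simp [List.length_take] at this
          omega
        rw [aLoop_acc, ih (by omega)]
        simp [hp]

-- closed form of B's fold: last indented index, via the reverse-takeWhile length
theorem bFold_closed (lines : List String) :
    (PySem.List.enumerate lines).foldl
      (fun acc il => if pvIndented il.2 then il.1 else acc) (-1 : Int) =
      (if (lines.reverse.takeWhile (fun l => !pvIndented l)).length = lines.length then (-1 : Int)
       else ((lines.length : Int) - (lines.reverse.takeWhile (fun l => !pvIndented l)).length - 1)) := by
  induction lines using List.reverseRecOn with
  | nil => simp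
  | append_singleton xs x ih =>
      rw [PySem.List.enumerate_append, List.foldl_append, ih]
      have hle := len_takeWhile_le (fun l => !pvIndented l) xs.reverse
      simp only [List.length_reverse] at hle
      by_cases hp : pvIndented x
      · simp [PySem.List.enumerate, hp]
      · simp only [List.reverse_append, List.reverse_cons, List.reverse_nil, List.nil_append,
          List.cons_append, List.takeWhile_cons, Bool.not_false, if_true,
          PySem.List.enumerate, List.foldl_cons, List.foldl_nil, hp, Bool.false_eq_true,
          if_false, List.length_cons, List.length_append, List.length_nil]
        split_ifs with h1 h2 h2
        · rfl
        · omega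
        · omega
        · push_cast; ring

-- the collected trailing lines form the reversed suffix of the list
theorem rev_decomp (l : List String) (q : String → Bool) :
    l = (l.reverse.dropWhile q).reverse ++ (l.reverse.takeWhile q).reverse := by
  conv_lhs => rw [← l.reverse_reverse,
    ← List.takeWhile_append_dropWhile (p := q) (l := l.reverse)]
  rw [List.reverse_append]

theorem tw_rev_eq_drop (l : List String) (q : String → Bool) :
    (l.reverse.takeWhile q).reverse =
      l.drop (l.length - (l.reverse.takeWhile q).length) := by
  have hlen : l.length = (l.reverse.dropWhile q).length + (l.reverse.takeWhile q).length := by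
    conv_lhs => rw [rev_decomp l q]
    simp
  have h2 : l.length - (l.reverse.takeWhile q).length = (l.reverse.dropWhile q).reverse.length := by
    simp; omega
  calc (l.reverse.takeWhile q).reverse
      = List.drop (l.reverse.dropWhile q).reverse.length
          ((l.reverse.dropWhile q).reverse ++ (l.reverse.takeWhile q).reverse) :=
        List.drop_left.symm
    _ = List.drop (l.length - (l.reverse.takeWhile q).length)
          ((l.reverse.dropWhile q).reverse ++ (l.reverse.takeWhile q).reverse) := by rw [h2]
    _ = List.drop (l.length - (l.reverse.takeWhile q).length) l := by rw [← rev_decomp]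

-- main equality on an arbitrary list of lines
theorem core_eq (lines : List String) :
    (let r := aLoop lines lines.length []
     let codes :=
       if 1 ≤ r.2 then
         r.1 ++ [PySem.Str.join "\n" (PySem.List.slice lines none (some (r.2 : Int)))]
       else r.1
     (PySem.List.slice? codes none none (-1)).getD []) =
    (let split := (PySem.List.enumerate lines).foldl
        (fun acc il => if pvIndented il.2 then il.1 else acc) (-1 : Int)
     if 0 ≤ split then
       PySem.Str.join "\n" (PySem.List.slice lines none (some (split + 1)))
         :: PySem.List.slice lines (some (split + 1)) none
     else lines) := by
  simp only
  rw [aLoop_closed lines lines.length le_rfl, List.take_length, bFold_closed]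
  set q : String → Bool := fun l => !pvIndented l with hq
  set T := lines.reverse.takeWhile q with hT
  have hle : T.length ≤ lines.length := by
    have := len_takeWhile_le q lines.reverse
    simpa using this
  by_cases hkn : T.length = lines.length
  · -- no indented line: A collects everything, B returns lines unchanged
    rw [if_pos hkn, if_neg (by omega), if_neg (by omega)]
    rw [PySem.List.slice?_none_none_neg_one, Option.getD_some]
    have := tw_rev_eq_drop lines q
    rw [← hT, hkn, Nat.sub_self, List.drop_zero] at this
    exact this
  · -- some indented line at index lines.length - T.length - 1
    have hlt : T.length < lines.length := lt_of_le_of_ne hle hkn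
    rw [if_neg hkn, if_pos (by omega), if_pos (by omega)]
    rw [PySem.List.slice?_none_none_neg_one, Option.getD_some, List.reverse_append,
      List.reverse_singleton, List.singleton_append]
    have hcast : ((lines.length : Int) - T.length - 1) + 1 = ((lines.length - T.length : Nat) : Int) := by
      omega
    rw [hcast, PySem.List.slice_from_natCast]
    congr 1
    exact tw_rev_eq_drop lines q

-- ===== VERDICT (by name: the statement is the Claim_ definition above) =====
theorem split_code_blocks_spec : Claim_equal_split_code_blocks := by
  intro code _
  unfold Spec_split_code_blocks split_code_blocks split_code_blocks_alt
  exact core_eq _
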